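-- pv_equiv track=rewrite | github.com/dnrudzx/Python | Programmers/Level2/문자열 압축.py | solution
-- ===== SOURCE A (Python) =====
-- import math
--
-- def solution(s):
--     best = len(s)
--     zip_count = 1
--
--     while True:
--         minus = 0
--         count = 0
--
--         before = False
--         upper = 0
--         upper_case = 0
--         temp = s
--         while len(temp) > zip_count:
--             a = temp[0:zip_count]
--             b = temp[zip_count:2 * zip_count]
--             temp = temp[zip_count:]
--             if a == b:
--                 minus += zip_count
--                 if before == False:
--                     count += 1
--                 else:
--                     upper += 1
--                     if upper == 8:
--                         upper_case += 1
--                     if upper == 98: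
--                         upper_case += 1
--                     if upper == 998:
--                         upper_case += 1
--
--                 before = True
--             else:
--                 before = False
--                 upper = 0
--         result_len = len(s) - minus + count + upper_case
--
--         if best > result_len:
--             best = result_len
--         if zip_count > math.ceil(len(s) / 2):
--             break
--         zip_count += 1
--
--     return best
-- ===== SOURCE B (Python) =====
-- def solution(s):
--     # Additive run-grouping rewrite: chunk the string per width, sum each
--     # maximal run's contribution (digit count by thresholds, as A caps it).
--     n = len(s)
--     best = n
--     for w in range(1, n // 2 + 1):
--         chunks = [s[i:i + w] for i in range(0, n, w)]
--         total = 0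
--         i = 0
--         while i < len(chunks):
--             j = i
--             while j < len(chunks) and chunks[j] == chunks[i]:
--                 j += 1
--             m = j - i
--             total += len(chunks[i])
--             if m > 1:
--                 total += 1 + (m >= 10) + (m >= 100) + (m >= 1000)
--             i = j
--         best = min(best, total)
--     return best
-- ===== Notes on version B (the rewrite author's own statement) =====
-- stated objective: simpler
-- what changed: B splits the string into an explicit chunk list per width and adds up each maximal run's contribution directly (chunk length plus a threshold digit count for runs longer than 1), replacing A's subtractive streaming state machine with its before/upper/upper_case bookkeeping, its repeated re-slicing of the shrinking temp string, and its end-of-loop break control.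
import Mathlib
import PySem

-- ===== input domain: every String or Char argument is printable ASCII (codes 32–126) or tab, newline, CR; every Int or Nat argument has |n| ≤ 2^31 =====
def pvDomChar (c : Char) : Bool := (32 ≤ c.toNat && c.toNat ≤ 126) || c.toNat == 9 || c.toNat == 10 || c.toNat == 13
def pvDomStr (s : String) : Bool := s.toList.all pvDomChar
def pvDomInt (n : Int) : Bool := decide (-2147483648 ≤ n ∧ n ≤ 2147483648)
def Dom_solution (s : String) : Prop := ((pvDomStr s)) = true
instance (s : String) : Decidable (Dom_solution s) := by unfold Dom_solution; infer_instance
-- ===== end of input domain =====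

-- B rewrites A's subtractive streaming state machine (before/upper/upper_case counters over a
-- shrinking string) as an additive per-width sum over maximal runs of a chunk list; same values.

-- ===== PORT A =====
-- Inner `while len(temp) > zip_count` loop of A.  The mutable accumulators
-- (minus, count, upper, upper_case) are recursion parameters; the final triple
-- (minus, count, upper_case) is returned.  Slices temp[0:w], temp[w:2w], temp[w:]
-- with w ≥ 1 are List.take/List.drop (all indices nonnegative, exact).
-- The `w ≠ 0` conjunct is a totalizing guard only: A's width is always ≥ 1.
def aLoop (w : Nat) (temp : List Char) (minus count : Int) (before : Bool) (upper : Nat) (uc : Int) : Int × Int × Int :=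
  if h : w < temp.length ∧ w ≠ 0 then
    let a := temp.take w
    let b := (temp.drop w).take w
    if a = b then
      if before then
        let u' := upper + 1
        let uc' := uc + (if u' = 8 then 1 else 0) + (if u' = 98 then 1 else 0) + (if u' = 998 then 1 else 0)
        aLoop w (temp.drop w) (minus + (w : Int)) count true u' uc'
      else
        aLoop w (temp.drop w) (minus + (w : Int)) (count + 1) true upper uc
    else
      aLoop w (temp.drop w) minus count false 0 uc
  else (minus, count, uc)
termination_by temp.length
decreasing_by all_goals (simp; omega)

-- Outer `while True` loop: body, update best, break once zip_count > ceil(len/2).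
-- math.ceil(len(s)/2) is computed exactly as (len+1)/2 (the float division is exact here).
def aOuter (ceilHalf : Nat) (l : List Char) (z : Nat) (best : Int) : Int :=
  let r := aLoop z l 0 0 false 0 0
  let result_len : Int := (l.length : Int) - r.1 + r.2.1 + r.2.2
  let best' := if best > result_len then result_len else best
  if ceilHalf < z then best' else aOuter ceilHalf l (z + 1) best'
termination_by ceilHalf + 1 - z

def solution (s : String) : Int :=
  aOuter ((s.toList.length + 1) / 2) s.toList 1 (s.toList.length : Int)

-- ===== PORT B =====
-- [s[i:i+w] for i in range(0, n, w)]: the successive w-sized chunks (`w = 0` guard for totality).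
def chunksOf (w : Nat) (l : List Char) : List (List Char) :=
  if l = [] ∨ w = 0 then []
  else l.take w :: chunksOf w (l.drop w)
termination_by l.length
decreasing_by rename_i h; simp at h ⊢; rcases l with _|⟨x,t⟩ <;> simp_all; omega

-- 1 + (m >= 10) + (m >= 100) + (m >= 1000)
def digits4 (m : Nat) : Int :=
  1 + (if 10 ≤ m then 1 else 0) + (if 100 ≤ m then 1 else 0) + (if 1000 ≤ m then 1 else 0)

-- the i/j run-scanning while loop over the chunk list: k = further chunks equal to the
-- first one, the run has m = k+1 chunks, then continue after the run.
def bRuns : List (List Char) → Int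
  | [] => 0
  | c :: rest =>
    let k := (rest.takeWhile (fun x => x == c)).length
    (c.length : Int) + (if 0 < k then digits4 (k + 1) else 0) + bRuns (rest.drop k)
termination_by l => l.length
decreasing_by simp

-- best over widths range(1, n//2 + 1), starting from best = n
def solution_alt (s : String) : Int :=
  let l := s.toList
  let n := l.length
  (List.range' 1 (n / 2)).foldl (fun best w => min best (bRuns (chunksOf w l))) (n : Int)

-- ===== PRECONDITION & SPEC =====
def Spec_solution (s : String) (out : Int) : Prop := out = solution_alt s
instance (s : String) (out : Int) : Decidable (Spec_solution s out) := by unfold Spec_solution; infer_instance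

-- ===== CLAIM (what is proved, stated in full; the proofs are below) =====
def Claim_equal_solution : Prop := ∀ (s : String), Dom_solution s → Spec_solution s (solution s)

-- ===== LEMMAS AND PROOFS =====

-- proof-only helpers: the length of A's initial chain of chunk matches at width w
def matchRun (w : Nat) (l : List Char) : Nat :=
  if h : w < l.length ∧ w ≠ 0 ∧ l.take w = (l.drop w).take w then
    1 + matchRun w (l.drop w)
  else 0
termination_by l.length
decreasing_by simp; omega

-- upper_case gained while upper runs from u+1 up to u+r
def gain (u r : Nat) : Int :=
  (if u < 8 ∧ 8 ≤ u + r then 1 else 0) + (if u < 98 ∧ 98 ≤ u + r then 1 else 0) +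
    (if u < 998 ∧ 998 ≤ u + r then 1 else 0)

-- A's result_len for width w
def valA (w : Nat) (l : List Char) : Int :=
  (l.length : Int) - (aLoop w l 0 0 false 0 0).1 + (aLoop w l 0 0 false 0 0).2.1 +
    (aLoop w l 0 0 false 0 0).2.2


theorem aLoop_stop {w : Nat} {temp : List Char} (m c : Int) (b : Bool) (u : Nat) (uc : Int)
    (h : ¬(w < temp.length ∧ w ≠ 0)) : aLoop w temp m c b u uc = (m, c, uc) := by
  rw [aLoop.eq_def, dif_neg h]

theorem aLoop_mismatch {w : Nat} {temp : List Char} (m c : Int) (b : Bool) (u : Nat) (uc : Int)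
    (h : w < temp.length ∧ w ≠ 0) (hne : temp.take w ≠ (temp.drop w).take w) :
    aLoop w temp m c b u uc = aLoop w (temp.drop w) m c false 0 uc := by
  rw [aLoop.eq_def, dif_pos h]; simp only [if_neg hne]

theorem aLoop_match_false {w : Nat} {temp : List Char} (m c : Int) (u : Nat) (uc : Int)
    (h : w < temp.length ∧ w ≠ 0) (heq : temp.take w = (temp.drop w).take w) :
    aLoop w temp m c false u uc = aLoop w (temp.drop w) (m + (w : Int)) (c + 1) true u uc := by
  rw [aLoop.eq_def, dif_pos h]; simp only [if_pos heq, Bool.false_eq_true, if_false]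

theorem aLoop_match_true {w : Nat} {temp : List Char} (m c : Int) (u : Nat) (uc : Int)
    (h : w < temp.length ∧ w ≠ 0) (heq : temp.take w = (temp.drop w).take w) :
    aLoop w temp m c true u uc = aLoop w (temp.drop w) (m + (w : Int)) c true (u + 1)
      (uc + (if u + 1 = 8 then 1 else 0) + (if u + 1 = 98 then 1 else 0) + (if u + 1 = 998 then 1 else 0)) := by
  rw [aLoop.eq_def, dif_pos h]; simp only [if_pos heq, if_true]

theorem matchRun_pos {w : Nat} {l : List Char}
    (h : w < l.length ∧ w ≠ 0 ∧ l.take w = (l.drop w).take w) :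
    matchRun w l = 1 + matchRun w (l.drop w) := by
  rw [matchRun.eq_def, dif_pos h]

theorem matchRun_zero {w : Nat} {l : List Char}
    (h : ¬(w < l.length ∧ w ≠ 0 ∧ l.take w = (l.drop w).take w)) : matchRun w l = 0 := by
  rw [matchRun.eq_def, dif_neg h]

theorem chunksOf_nil (w : Nat) : chunksOf w [] = [] := by rw [chunksOf]; simp

theorem chunksOf_pos {w : Nat} {l : List Char} (hl : l ≠ []) (hw : w ≠ 0) :
    chunksOf w l = l.take w :: chunksOf w (l.drop w) := by
  rw [chunksOf.eq_def]; simp [hl, hw]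

theorem bRuns_nil : bRuns [] = 0 := by rw [bRuns]

theorem bRuns_cons (c : List Char) (rest : List (List Char)) :
    bRuns (c :: rest) = (c.length : Int) +
      (if 0 < (rest.takeWhile (fun x => x == c)).length then
        digits4 ((rest.takeWhile (fun x => x == c)).length + 1) else 0) +
      bRuns (rest.drop (rest.takeWhile (fun x => x == c)).length) := by
  rw [bRuns]


theorem aLoop_shift (w : Nat) : ∀ (n : Nat) (temp : List Char), temp.length ≤ n →
    ∀ (b : Bool) (u : Nat) (m c uc : Int),
    aLoop w temp m c b u uc =
      (m + (aLoop w temp 0 0 b u 0).1, c + (aLoop w temp 0 0 b u 0).2.1,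
        uc + (aLoop w temp 0 0 b u 0).2.2) := by
  intro n
  induction n with
  | zero =>
    intro temp h b u m c uc
    have hs : ¬(w < temp.length ∧ w ≠ 0) := by omega
    rw [aLoop_stop _ _ _ _ _ hs, aLoop_stop _ _ _ _ _ hs]; simp
  | succ n ih =>
    intro temp h b u m c uc
    by_cases hc : w < temp.length ∧ w ≠ 0
    · have hlen : (temp.drop w).length ≤ n := by simp; omega
      by_cases heq : temp.take w = (temp.drop w).take w
      · cases b with
        | false =>
          rw [aLoop_match_false _ _ _ _ hc heq, aLoop_match_false _ _ _ _ hc heq]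
          rw [ih _ hlen true u (m + (w : Int)) (c + 1) uc,
            ih _ hlen true u ((0 : Int) + (w : Int)) ((0 : Int) + 1) 0]
          simp [Prod.ext_iff]; omega
        | true =>
          have h1 := ih (temp.drop w) hlen true (u + 1) (m + (w : Int)) c
            (uc + (if u + 1 = 8 then 1 else 0) + (if u + 1 = 98 then 1 else 0) +
              (if u + 1 = 998 then 1 else 0))
          have h2 := ih (temp.drop w) hlen true (u + 1) ((0 : Int) + (w : Int)) (0 : Int)
            ((0 : Int) + (if u + 1 = 8 then 1 else 0) + (if u + 1 = 98 then 1 else 0) +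
              (if u + 1 = 998 then 1 else 0))
          rw [aLoop_match_true _ _ _ _ hc heq, aLoop_match_true _ _ _ _ hc heq, h1, h2]
          simp [Prod.ext_iff]; omega
      · rw [aLoop_mismatch _ _ _ _ _ hc heq, aLoop_mismatch _ _ _ _ _ hc heq]
        rw [ih _ hlen false 0 m c uc, ih _ hlen false 0 0 0 0]
    · rw [aLoop_stop _ _ _ _ _ hc, aLoop_stop _ _ _ _ _ hc]; simp


theorem gain_zero (u : Nat) : gain u 0 = 0 := by
  simp only [gain]; split_ifs <;> omega

theorem gain_succ (u r : Nat) : gain u (1 + r) =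
    (if u + 1 = 8 then 1 else 0) + (if u + 1 = 98 then 1 else 0) + (if u + 1 = 998 then 1 else 0) +
      gain (u + 1) r := by
  simp only [gain]; split_ifs <;> omega

theorem digits4_gain (r : Nat) : digits4 (r + 2) = 1 + gain 0 r := by
  simp only [digits4, gain]; split_ifs <;> omega

-- run peel: from state (before = true, upper = u) A consumes the whole chain of matches
theorem aLoop_run (w : Nat) (hw : w ≠ 0) : ∀ (n : Nat) (temp : List Char), temp.length ≤ n →
    ∀ u : Nat,
    aLoop w temp 0 0 true u 0 =
      (((w * matchRun w temp : Nat) : Int) + (aLoop w (temp.drop (w * matchRun w temp)) 0 0 false 0 0).1,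
       (aLoop w (temp.drop (w * matchRun w temp)) 0 0 false 0 0).2.1,
       gain u (matchRun w temp) + (aLoop w (temp.drop (w * matchRun w temp)) 0 0 false 0 0).2.2) := by
  intro n
  induction n with
  | zero =>
    intro temp h u
    have hs : ¬(w < temp.length ∧ w ≠ 0) := by omega
    have hm : matchRun w temp = 0 := matchRun_zero (by omega)
    rw [hm, aLoop_stop _ _ _ _ _ hs]
    simp [aLoop_stop _ _ _ _ _ hs, gain_zero]
  | succ n ih =>
    intro temp h u
    by_cases hm : w < temp.length ∧ w ≠ 0 ∧ temp.take w = (temp.drop w).take w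
    · have hlen : (temp.drop w).length ≤ n := by simp; omega
      rw [matchRun_pos hm]
      rw [aLoop_match_true _ _ _ _ ⟨hm.1, hw⟩ hm.2.2]
      rw [aLoop_shift w n (temp.drop w) hlen true (u + 1) ((0 : Int) + (w : Int)) 0
        ((0 : Int) + (if u + 1 = 8 then 1 else 0) + (if u + 1 = 98 then 1 else 0) +
          (if u + 1 = 998 then 1 else 0))]
      rw [ih (temp.drop w) hlen (u + 1)]
      have hd : (temp.drop w).drop (w * matchRun w (temp.drop w)) =
          temp.drop (w * (1 + matchRun w (temp.drop w))) := by
        rw [List.drop_drop]; ring_nf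
      rw [hd, gain_succ]
      simp [Prod.ext_iff]
      constructor
      · ring
      · ring
    · have hr : matchRun w temp = 0 := matchRun_zero hm
      rw [hr]
      simp only [Nat.mul_zero, List.drop_zero, Nat.cast_zero, gain_zero]
      by_cases hc : w < temp.length ∧ w ≠ 0
      · have hne : temp.take w ≠ (temp.drop w).take w := by
          intro he; exact hm ⟨hc.1, hw, he⟩
        rw [aLoop_mismatch _ _ _ _ _ hc hne, aLoop_mismatch _ _ _ _ _ hc hne]
        simp
      · rw [aLoop_stop _ _ _ _ _ hc, aLoop_stop _ _ _ _ _ hc]; simp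

-- a chain of r ≥ 1 matches needs w*r + w characters
theorem matchRun_bound (w : Nat) : ∀ (n : Nat) (l : List Char), l.length ≤ n →
    1 ≤ matchRun w l → w * matchRun w l + w ≤ l.length := by
  intro n
  induction n with
  | zero =>
    intro l h h1
    rw [matchRun_zero (by omega)] at h1; omega
  | succ n ih =>
    intro l h h1
    by_cases hm : w < l.length ∧ w ≠ 0 ∧ l.take w = (l.drop w).take w
    · rw [matchRun_pos hm]
      have hlen : (l.drop w).length ≤ n := by simp; omega
      by_cases h2 : 1 ≤ matchRun w (l.drop w)
      · have := ih (l.drop w) hlen h2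
        simp [List.length_drop] at this
        have hmul : w * (1 + matchRun w (l.drop w)) = w * matchRun w (l.drop w) + w := by ring
        rw [hmul]; omega
      · have h0 : matchRun w (l.drop w) = 0 := by omega
        have := congrArg List.length hm.2.2
        simp [List.length_take, List.length_drop] at this
        rw [h0]; omega
    · rw [matchRun_zero hm] at h1; omega

-- after the whole chain is consumed no match is left
theorem matchRun_after (w : Nat) : ∀ (n : Nat) (l : List Char), l.length ≤ n →
    matchRun w (l.drop (w * matchRun w l)) = 0 := by
  intro n
  induction n with
  | zero =>
    intro l h
    have h0 : matchRun w l = 0 := matchRun_zero (by omega)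
    rw [h0]; simpa using h0
  | succ n ih =>
    intro l h
    by_cases hm : w < l.length ∧ w ≠ 0 ∧ l.take w = (l.drop w).take w
    · rw [matchRun_pos hm]
      have hlen : (l.drop w).length ≤ n := by simp; omega
      have := ih (l.drop w) hlen
      rw [List.drop_drop] at this
      have he : w + w * matchRun w (l.drop w) = w * (1 + matchRun w (l.drop w)) := by ring
      rwa [he] at this
    · rw [matchRun_zero hm, Nat.mul_zero, List.drop_zero, matchRun_zero hm]

-- the run length B's takeWhile sees equals A's match chain
theorem chunk_run (w : Nat) (hw : w ≠ 0) : ∀ (n : Nat) (l : List Char), l.length ≤ n →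
    ((chunksOf w (l.drop w)).takeWhile (fun x => x == l.take w)).length = matchRun w l := by
  intro n
  induction n with
  | zero =>
    intro l h
    have hl : l.drop w = [] := by
      have : l = [] := by cases l <;> simp_all
      simp [this]
    rw [hl, chunksOf_nil, matchRun_zero (by omega)]; simp
  | succ n ih =>
    intro l h
    by_cases hm : w < l.length ∧ w ≠ 0 ∧ l.take w = (l.drop w).take w
    · have hne : l.drop w ≠ [] := by
        intro he
        have := congrArg List.length he
        simp at this; omega
      rw [chunksOf_pos hne hw, matchRun_pos hm]
      rw [List.takeWhile_cons]
      have hb : ((l.drop w).take w == l.take w) = true := by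
        simp [hm.2.2]
      rw [hb]
      simp only [if_true, List.length_cons]
      have hpred : (fun x => x == l.take w) = (fun x => x == (l.drop w).take w) := by
        rw [hm.2.2]
      have hlen : (l.drop w).length ≤ n := by simp; omega
      rw [hpred, ih (l.drop w) hlen]
      omega
    · rw [matchRun_zero hm]
      by_cases hlw : l.length ≤ w
      · have hl : l.drop w = [] := by
          simp [List.drop_eq_nil_iff]; omega
        rw [hl, chunksOf_nil]; simp
      · have hc : w < l.length := by omega
        have hne : l.drop w ≠ [] := by
          intro he; have := congrArg List.length he; simp at this; omega
        have hneq : l.take w ≠ (l.drop w).take w := by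
          intro he; exact hm ⟨hc, hw, he⟩
        rw [chunksOf_pos hne hw, List.takeWhile_cons]
        have hb : ((l.drop w).take w == l.take w) = false := by
          simp; intro he; exact hneq he.symm
        rw [hb]; simp

-- dropping j chunks = chunking after w*j characters
theorem chunksOf_drop (w : Nat) (hw : w ≠ 0) : ∀ (j : Nat) (l : List Char),
    (chunksOf w l).drop j = chunksOf w (l.drop (w * j)) := by
  intro j
  induction j with
  | zero => intro l; simp
  | succ j ih =>
    intro l
    by_cases hl : l = []
    · subst hl; rw [chunksOf_nil]; simp [chunksOf_nil]
    · rw [chunksOf_pos hl hw]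
      rw [List.drop_succ_cons, ih (l.drop w), List.drop_drop]
      congr 1
      ring_nf


theorem valA_def (w : Nat) (l : List Char) : valA w l =
    (l.length : Int) - (aLoop w l 0 0 false 0 0).1 + (aLoop w l 0 0 false 0 0).2.1 +
      (aLoop w l 0 0 false 0 0).2.2 := rfl

-- main per-width lemma: A's result_len equals B's per-width total
theorem valA_eq (w : Nat) (hw : w ≠ 0) : ∀ (n : Nat) (l : List Char), l.length ≤ n →
    valA w l = bRuns (chunksOf w l) := by
  intro n
  induction n with
  | zero =>
    intro l h
    have hl : l = [] := by cases l <;> simp_all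
    subst hl
    rw [valA_def, aLoop_stop _ _ _ _ _ (by simp), chunksOf_nil, bRuns_nil]
    simp
  | succ n ih =>
    intro l h
    by_cases hc : w < l.length
    · have hlne : l ≠ [] := by intro he; subst he; simp at hc
      by_cases heq : l.take w = (l.drop w).take w
      · -- a run starts here
        have hrl : matchRun w l = 1 + matchRun w (l.drop w) := matchRun_pos ⟨hc, hw, heq⟩
        set r' := matchRun w (l.drop w) with hr'
        set l2 := (l.drop w).drop (w * r') with hl2
        set P := aLoop w l2 0 0 false 0 0 with hP
        have hlen : (l.drop w).length ≤ n := by simp; omega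
        have hbb : w * (1 + r') = w + w * r' := by ring
        have hb : w * (1 + r') + w ≤ l.length := by
          have := matchRun_bound w (n + 1) l (by omega) (by rw [hrl]; omega)
          rwa [hrl] at this
        have hl2len : l2.length = l.length - w - w * r' := by
          rw [hl2]; simp; omega
        -- A side
        have s1 : aLoop w l 0 0 false 0 0 =
            aLoop w (l.drop w) (0 + (w : Int)) (0 + 1) true 0 0 :=
          aLoop_match_false _ _ _ _ ⟨hc, hw⟩ heq
        have s2 := aLoop_shift w n (l.drop w) hlen true 0 ((0 : Int) + (w : Int)) ((0 : Int) + 1) 0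
        have s3 := aLoop_run w hw n (l.drop w) hlen 0
        have hA : aLoop w l 0 0 false 0 0 =
            (0 + (w : Int) + (((w * r' : Nat) : Int) + P.1), 0 + 1 + P.2.1,
              0 + (gain 0 r' + P.2.2)) := by
          rw [s1, s2, s3]
        have hA1 : (aLoop w l 0 0 false 0 0).1 = 0 + (w : Int) + (((w * r' : Nat) : Int) + P.1) := by
          rw [hA]
        have hA2 : (aLoop w l 0 0 false 0 0).2.1 = 0 + 1 + P.2.1 := by rw [hA]
        have hA3 : (aLoop w l 0 0 false 0 0).2.2 = 0 + (gain 0 r' + P.2.2) := by rw [hA]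
        -- B side at l
        have hk : ((chunksOf w (l.drop w)).takeWhile (fun x => x == l.take w)).length = 1 + r' := by
          rw [chunk_run w hw (n + 1) l (by omega), hrl]
        have hdd : (chunksOf w (l.drop w)).drop (1 + r') = chunksOf w (l2.drop w) := by
          rw [chunksOf_drop w hw, hl2, List.drop_drop, List.drop_drop, List.drop_drop]
          rw [show w + w * (1 + r') = w + (w * r' + w) by ring]
        have htk : ((l.take w).length : Int) = (w : Int) := by
          simp [List.length_take]; omega
        have hBl : bRuns (chunksOf w l) =
            ((l.take w).length : Int) + digits4 (r' + 2) + bRuns (chunksOf w (l2.drop w)) := by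
          rw [chunksOf_pos hlne hw, bRuns_cons, hk, hdd, if_pos (by omega)]
          rw [show 1 + r' + 1 = r' + 2 by ring]
        -- B side at l2
        have hl2ne : l2 ≠ [] := by
          intro he; have := congrArg List.length he; simp [hl2] at this; omega
        have hafter : matchRun w l2 = 0 := by
          have hx := matchRun_after w (n + 1) l (by omega)
          rw [hrl] at hx
          rw [hl2, List.drop_drop, show w + w * r' = w * (1 + r') by ring]
          exact hx
        have hk2 : ((chunksOf w (l2.drop w)).takeWhile (fun x => x == l2.take w)).length = 0 := by
          rw [chunk_run w hw (n + 1) l2 (by omega), hafter]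
        have htk2 : ((l2.take w).length : Int) = (w : Int) := by
          simp [List.length_take]; omega
        have hBl2 : bRuns (chunksOf w l2) = ((l2.take w).length : Int) + bRuns (chunksOf w (l2.drop w)) := by
          rw [chunksOf_pos hl2ne hw, bRuns_cons, hk2]
          simp
        have ihl2 : valA w l2 = bRuns (chunksOf w l2) := ih l2 (by omega)
        rw [valA_def, ← hP] at ihl2
        rw [hBl2] at ihl2
        rw [valA_def, hA1, hA2, hA3, hBl]
        have hdg := digits4_gain r'
        omega
      · -- no run: first chunk is alone
        have hr0 : matchRun w l = 0 := matchRun_zero (by tauto)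
        have hlen : (l.drop w).length ≤ n := by simp; omega
        have s1 : aLoop w l 0 0 false 0 0 = aLoop w (l.drop w) 0 0 false 0 0 :=
          aLoop_mismatch _ _ _ _ _ ⟨hc, hw⟩ heq
        have hk : ((chunksOf w (l.drop w)).takeWhile (fun x => x == l.take w)).length = 0 := by
          rw [chunk_run w hw (n + 1) l (by omega), hr0]
        have htk : ((l.take w).length : Int) = (w : Int) := by
          simp [List.length_take]; omega
        have hBl : bRuns (chunksOf w l) = (w : Int) + bRuns (chunksOf w (l.drop w)) := by
          rw [chunksOf_pos hlne hw, bRuns_cons, hk, htk]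
          simp
        have ihd := ih (l.drop w) hlen
        rw [valA_def] at ihd ⊢
        rw [s1, hBl]
        rw [List.length_drop] at ihd
        omega
    · -- width ≥ length: single (possibly partial) chunk, value = len
      have hstop : aLoop w l 0 0 false 0 0 = (0, 0, 0) := aLoop_stop _ _ _ _ _ (by omega)
      rw [valA_def, hstop]
      by_cases hl : l = []
      · subst hl; rw [chunksOf_nil, bRuns_nil]; simp
      · have hd : l.drop w = [] := by simp [List.drop_eq_nil_iff]; omega
        rw [chunksOf_pos hl hw, hd, chunksOf_nil, bRuns_cons]
        have htl : ((l.take w).length : Int) = (l.length : Int) := by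
          simp [List.length_take]; omega
        simp [bRuns_nil, List.length_take]
        omega


theorem if_min (a b : Int) : (if a > b then b else a) = min a b := by
  rw [min_def]; split_ifs <;> omega

-- the outer while-loop as a fold of min over the widths z .. ceil+1
theorem aOuter_fold (l : List Char) : ∀ (k z : Nat) (best : Int), z ≠ 0 →
    z + k = (l.length + 1) / 2 + 1 →
    aOuter ((l.length + 1) / 2) l z best =
      (List.range' z (k + 1)).foldl (fun b w => min b (valA w l)) best := by
  intro k
  induction k with
  | zero =>
    intro z best hz hzk
    rw [aOuter.eq_def]
    simp only [show ((l.length + 1) / 2 < z) = True by simp; omega, if_true]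
    rw [List.range'_one]
    simp only [List.foldl_cons, List.foldl_nil]
    rw [← if_min, valA_def]
  | succ k ihk =>
    intro z best hz hzk
    conv_rhs => rw [List.range'_succ]
    rw [aOuter.eq_def]
    simp only [show ((l.length + 1) / 2 < z) = False by simp; omega, if_false]
    rw [ihk (z + 1) _ (by omega) (by omega)]
    simp only [List.foldl_cons]
    rw [← if_min, valA_def]

-- a width too large to compress leaves the length unchanged
theorem valA_big (w : Nat) (hw : w ≠ 0) (l : List Char) (h : l.length < 2 * w) :
    valA w l = (l.length : Int) := by
  by_cases hc : w < l.length
  · have hne : l.take w ≠ (l.drop w).take w := by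
      intro he
      have := congrArg List.length he
      simp [List.length_take, List.length_drop] at this
      omega
    have s1 := aLoop_mismatch (w := w) (temp := l) 0 0 false 0 0 ⟨hc, hw⟩ hne
    have s2 : aLoop w (l.drop w) 0 0 false 0 0 = (0, 0, 0) :=
      aLoop_stop _ _ _ _ _ (by simp; omega)
    rw [valA_def, s1, s2]; simp
  · rw [valA_def, aLoop_stop _ _ _ _ _ (by omega)]; simp

theorem fold_min_le (l : List Char) : ∀ (L : List Nat) (init : Int),
    List.foldl (fun b w => min b (valA w l)) init L ≤ init := by
  intro L
  induction L with
  | nil => intro init; simp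
  | cons x t ih =>
    intro init
    simp only [List.foldl_cons]
    exact le_trans (ih _) (min_le_left _ _)

-- the widths past n//2 contribute min best n and leave best unchanged
theorem fold_extra (l : List Char) : ∀ (m z : Nat) (acc : Int), l.length / 2 < z →
    acc ≤ (l.length : Int) →
    List.foldl (fun b w => min b (valA w l)) acc (List.range' z m) = acc := by
  intro m
  induction m with
  | zero => intro z acc _ _; simp
  | succ m ih =>
    intro z acc hz hacc
    rw [List.range'_succ]
    simp only [List.foldl_cons]
    rw [valA_big z (by omega) l (by omega), min_eq_left hacc]
    exact ih (z + 1) acc (by omega) hacc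

theorem solution_spec : Claim_equal_solution := by
  intro s _
  unfold Spec_solution solution solution_alt
  set l := s.toList with hl
  set n := l.length with hn
  rw [aOuter_fold l ((n + 1) / 2) 1 (n : Int) one_ne_zero (by omega)]
  have hsplit : List.range' 1 ((n + 1) / 2 + 1) =
      List.range' 1 (n / 2) ++ List.range' (1 + 1 * (n / 2)) ((n + 1) / 2 + 1 - n / 2) := by
    rw [List.range'_append]
    congr 1
    omega
  rw [hsplit, List.foldl_append]
  have hfirst : List.foldl (fun b w => min b (valA w l)) (n : Int) (List.range' 1 (n / 2)) =
      List.foldl (fun best w => min best (bRuns (chunksOf w l))) (n : Int) (List.range' 1 (n / 2)) := by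
    apply PySem.List.foldl_congr_mem
    intro acc x hx
    rw [List.mem_range'] at hx
    rw [valA_eq x (by omega) l.length l le_rfl]
  rw [hfirst]
  exact fold_extra l _ _ _ (by omega)
    (hfirst ▸ fold_min_le l (List.range' 1 (n / 2)) (n : Int))
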